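-- pv_equiv track=rewrite | github.com/jablonskim/jupyweave | core/document_processor.py | apply_echo_lines
-- ===== SOURCE A (Python) =====
-- def apply_echo_lines(echo_lines, code):
--     """Removes hidden lines from code"""
--     if echo_lines is None:
--         return code
--
--     code_lines = code.split('\n')
--     final_lines = []
--
--     for i, code_line in enumerate(code_lines):
--         visible = i + 1 in echo_lines[1]
--         if echo_lines[0]:
--             visible = not visible
--
--         if visible:
--             final_lines.append(code_line)
--
--     return '\n'.join(final_lines)
-- ===== SOURCE B (Python) =====
-- def apply_echo_lines(echo_lines, code):
--     """Removes hidden lines from code"""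
--     if echo_lines is None:
--         return code
--
--     code_lines = code.split('\n')
--     all_indices = set(range(1, len(code_lines) + 1))
--
--     if echo_lines[0]:
--         keep = all_indices - set(echo_lines[1])
--     else:
--         keep = all_indices & set(echo_lines[1])
--
--     return '\n'.join(code_lines[i - 1] for i in sorted(keep))
-- ===== Notes on version B (the rewrite author's own statement) =====
-- stated objective: idiomatic
-- what changed: Replaces the per-line loop with its per-index membership test and in-loop visibility flip by a single set difference/intersection on the full index set, then rebuilds the text from the sorted kept indices.
import Mathlib
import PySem

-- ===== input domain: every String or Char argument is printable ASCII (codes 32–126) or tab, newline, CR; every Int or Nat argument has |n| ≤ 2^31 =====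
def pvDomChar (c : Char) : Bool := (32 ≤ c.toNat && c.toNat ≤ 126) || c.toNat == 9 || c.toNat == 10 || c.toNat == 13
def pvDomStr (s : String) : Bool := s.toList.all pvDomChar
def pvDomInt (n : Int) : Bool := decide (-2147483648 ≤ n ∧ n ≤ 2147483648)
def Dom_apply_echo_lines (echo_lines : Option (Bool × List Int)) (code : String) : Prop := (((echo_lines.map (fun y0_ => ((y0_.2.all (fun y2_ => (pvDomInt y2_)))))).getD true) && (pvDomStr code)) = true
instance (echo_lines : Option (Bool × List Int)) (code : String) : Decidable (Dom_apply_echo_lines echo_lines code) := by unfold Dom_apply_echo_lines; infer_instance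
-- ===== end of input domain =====

-- B replaces the per-line loop (membership test + visibility flip inside the loop) by one
-- set difference/intersection on the full index set and a sorted reassembly (idiomatic; same cost).

-- ===== PORT A =====
def apply_echo_lines (echo_lines : Option (Bool × List Int)) (code : String) : String :=
  match echo_lines with
  | none => code
  | some (flag, hidden) =>
    let code_lines := (PySem.Str.split? code "\n").getD []   -- sep = "\n" ≠ "", so split? is always some
    let final_lines := (PySem.List.enumerate code_lines).foldl
      (fun acc p =>
        let visible := decide ((p.1 + 1) ∈ hidden)
        let visible := if flag then !visible else visible
        if visible then acc ++ [p.2] else acc) []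
    PySem.Str.join "\n" final_lines

-- ===== PORT B =====
def apply_echo_lines_alt (echo_lines : Option (Bool × List Int)) (code : String) : String :=
  match echo_lines with
  | none => code
  | some (flag, spec) =>
    let code_lines := (PySem.Str.split? code "\n").getD []   -- sep = "\n" ≠ "", so split? is always some
    let all_indices : PySem.Set Int :=
      PySem.Set.ofList (PySem.List.pyRange 1 ((code_lines.length : Int) + 1))
    let keep : PySem.Set Int :=
      if flag then PySem.Set.diff all_indices (PySem.Set.ofList spec)
      else PySem.Set.inter all_indices (PySem.Set.ofList spec)
    PySem.Str.join "\n"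
      ((PySem.List.sorted keep (fun i => i)).map
        (fun i => PySem.List.pyGetD code_lines (i - 1) ""))

-- ===== PRECONDITION & SPEC =====
def Spec_apply_echo_lines (echo_lines : Option (Bool × List Int)) (code : String) (out : String) : Prop := out = apply_echo_lines_alt echo_lines code
instance (echo_lines : Option (Bool × List Int)) (code : String) (out : String) : Decidable (Spec_apply_echo_lines echo_lines code out) := by unfold Spec_apply_echo_lines; infer_instance

-- ===== CLAIM (what is proved, stated in full; the proofs are below) =====
def Claim_equal_apply_echo_lines : Prop := ∀ (echo_lines : Option (Bool × List Int)) (code : String), Dom_apply_echo_lines echo_lines code → Spec_apply_echo_lines echo_lines code (apply_echo_lines echo_lines code)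

-- ===== LEMMAS AND PROOFS =====

-- the two kept-line lists coincide, for any flag / spec list / line list
lemma kept_lines_eq (flag : Bool) (spec : List Int) (lines : List String) :
    ((PySem.List.enumerate lines).foldl
      (fun acc p =>
        let visible := decide ((p.1 + 1) ∈ spec)
        let visible := if flag then !visible else visible
        if visible then acc ++ [p.2] else acc) [])
    = ((PySem.List.sorted
          (if flag then
            PySem.Set.diff (PySem.Set.ofList (PySem.List.pyRange 1 ((lines.length : Int) + 1))) (PySem.Set.ofList spec)
           else
            PySem.Set.inter (PySem.Set.ofList (PySem.List.pyRange 1 ((lines.length : Int) + 1))) (PySem.Set.ofList spec))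
          (fun i => i)).map
        (fun i => PySem.List.pyGetD lines (i - 1) "")) := by
  refine Eq.trans (PySem.List.foldl_append_if
    (fun p => if flag then !decide ((p.1 + 1) ∈ spec) else decide ((p.1 + 1) ∈ spec))
    (fun p => p.2) (PySem.List.enumerate lines) []) ?_
  rw [List.nil_append]
  rw [PySem.Set.ofList_eq_self_of_nodup _ (PySem.List.nodup_pyRange_one 1 _)]
  have hkeep : (if flag then
            PySem.Set.diff (PySem.List.pyRange 1 ((lines.length : Int) + 1)) (PySem.Set.ofList spec)
           else
            PySem.Set.inter (PySem.List.pyRange 1 ((lines.length : Int) + 1)) (PySem.Set.ofList spec))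
      = (PySem.List.pyRange 1 ((lines.length : Int) + 1)).filter
          (fun i => if flag then !decide (i ∈ spec) else decide (i ∈ spec)) := by
    cases flag <;>
      · simp only [PySem.Set.diff, PySem.Set.inter, if_true, if_false, Bool.false_eq_true]
        exact List.filter_congr (fun x _ => by
          simp [PySem.Set.contains, List.contains_eq_mem, PySem.Set.mem_ofList])
  rw [hkeep]
  rw [PySem.List.sorted_eq_self_of_pairwise _ _
    (((PySem.List.pairwise_lt_pyRange_one 1 _).filter _).imp (fun h => le_of_lt h))]
  rw [PySem.List.enumerate_eq_map_pyRange lines "", List.filter_map, List.map_map]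
  rw [PySem.List.pyRange_one 0, PySem.List.pyRange_one 1]
  rw [List.filter_map, List.filter_map, List.map_map, List.map_map]
  simp only [PySem.List.len_eq]
  have hn : ((lines.length : Int) - 0).toNat = ((lines.length : Int) + 1 - 1).toNat := by omega
  rw [hn]
  congr 1
  · funext k; simp only [Function.comp]; norm_num
  · apply List.filter_congr; intro k _; simp only [Function.comp]; norm_num [add_comm]


-- ===== VERDICT (by name: the statement is the Claim_ definition above) =====
theorem apply_echo_lines_spec : Claim_equal_apply_echo_lines := by
  intro el code _
  unfold Spec_apply_echo_lines apply_echo_lines apply_echo_lines_alt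
  match el with
  | none => rfl
  | some (flag, spec) =>
    simp only []
    rw [kept_lines_eq]
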